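-- pv_equiv track=rewrite | github.com/Ashutoshgt1/Crawling | distributed_crawler/shared/parser.py | important_page_candidates
-- ===== SOURCE A (Python) =====
-- IMPORTANT_PAGE_PATTERNS = {
--     "about": ("/about", "/about-us", "/company", "/who-we-are", "/overview"),
--     "contact": ("/contact", "/contact-us", "/reach-us", "/locations"),
--     "leadership": ("/leadership", "/management", "/team", "/board"),
--     "careers": ("/careers", "/jobs", "/join-us"),
-- }
--
-- PAGE_TYPE_PRIORITY = {
--     "contact": 4,
--     "about": 3,
--     "leadership": 2,
--     "careers": 1,
--     "generic": 0,
-- }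
--
-- def important_page_links(links: list[str]) -> dict[str, list[str]]:
--     grouped: dict[str, list[str]] = {key: [] for key in IMPORTANT_PAGE_PATTERNS}
--     for link in links:
--         lowered = link.lower()
--         for page_type, patterns in IMPORTANT_PAGE_PATTERNS.items():
--             if any(pattern in lowered for pattern in patterns):
--                 grouped[page_type].append(link)
--     return {key: value[:5] for key, value in grouped.items() if value}
--
-- def important_page_candidates(links: list[str]) -> list[dict[str, str]]:
--     candidates: list[dict[str, str]] = []
--     grouped = important_page_links(links)
--     for page_type, page_links in grouped.items():
--         for link in page_links:
--             candidates.append({"url": link, "page_type": page_type})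
--     candidates.sort(key=lambda item: PAGE_TYPE_PRIORITY.get(item["page_type"], 0), reverse=True)
--     return candidates[:10]
-- ===== SOURCE B (Python) =====
-- PRIORITY_ORDER = (
--     ("contact", ("/contact", "/contact-us", "/reach-us", "/locations")),
--     ("about", ("/about", "/about-us", "/company", "/who-we-are", "/overview")),
--     ("leadership", ("/leadership", "/management", "/team", "/board")),
--     ("careers", ("/careers", "/jobs", "/join-us")),
-- )
--
-- def important_page_candidates(links: list[str]) -> list[dict[str, str]]:
--     candidates: list[dict[str, str]] = []
--     for page_type, patterns in PRIORITY_ORDER: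
--         matched = [link for link in links if any(p in link.lower() for p in patterns)]
--         for link in matched[:5]:
--             candidates.append({"url": link, "page_type": page_type})
--     return candidates[:10]
-- ===== Notes on version B (the rewrite author's own statement) =====
-- stated objective: simpler
-- what changed: B drops the grouping dict and the stable sort: it walks the page types once in descending priority order (contact, about, leadership, careers), collects up to 5 matching links per type in input order, and slices the concatenation to 10.
import Mathlib
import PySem

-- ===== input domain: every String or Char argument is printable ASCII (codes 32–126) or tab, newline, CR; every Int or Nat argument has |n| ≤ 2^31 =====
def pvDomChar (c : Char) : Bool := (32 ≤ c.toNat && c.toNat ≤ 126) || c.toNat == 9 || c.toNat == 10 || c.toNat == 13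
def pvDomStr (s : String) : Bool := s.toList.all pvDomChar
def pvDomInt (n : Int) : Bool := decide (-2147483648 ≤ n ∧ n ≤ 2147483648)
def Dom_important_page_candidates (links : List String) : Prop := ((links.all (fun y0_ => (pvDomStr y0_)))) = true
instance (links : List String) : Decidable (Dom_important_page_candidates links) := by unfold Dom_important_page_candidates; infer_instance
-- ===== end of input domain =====

-- B replaces A's grouping dict + stable sort by one pass over the page types in
-- descending priority order; objective: simpler.

-- ===== PORT A =====
-- IMPORTANT_PAGE_PATTERNS (module constant), as an assoc list in insertion order
def pvPatterns : List (String × List String) :=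
  [("about", ["/about", "/about-us", "/company", "/who-we-are", "/overview"]),
   ("contact", ["/contact", "/contact-us", "/reach-us", "/locations"]),
   ("leadership", ["/leadership", "/management", "/team", "/board"]),
   ("careers", ["/careers", "/jobs", "/join-us"])]

-- PAGE_TYPE_PRIORITY (module constant)
def pvPriority : List (String × Int) :=
  [("contact", 4), ("about", 3), ("leadership", 2), ("careers", 1), ("generic", 0)]

-- dict.get(k, default): first-match lookup on the assoc list (exact: keys are distinct)
def pvGetD (d : List (String × Int)) (k : String) (dflt : Int) : Int :=
  match d with
  | [] => dflt
  | (k', v) :: t => if k' == k then v else pvGetD t k dflt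

-- grouped[k].append(v): in-place append on the entry of key k (exact hand port of the
-- dict mutation: the dict's keys are the distinct literals of pvPatterns, so updating
-- the first matching entry is Python's behaviour; a missing key never occurs here)
def pvAppendAt (d : List (String × List String)) (k : String) (v : String) :
    List (String × List String) :=
  match d with
  | [] => []
  | (k', l) :: t => if k' == k then (k', l ++ [v]) :: t else (k', l) :: pvAppendAt t k v

-- item["page_type"]: first-match lookup on the item dict (exact when the key is present,
-- which holds for every item this code builds: {"url": …, "page_type": …})
def pvItemGet (item : List (String × String)) (k : String) : String :=
  match item with
  | [] => ""
  | (k', v) :: t => if k' == k then v else pvItemGet t k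

def important_page_links (links : List String) : List (String × List String) :=
  -- grouped = {key: [] for key in IMPORTANT_PAGE_PATTERNS}
  let grouped := pvPatterns.map (fun kv => (kv.1, ([] : List String)))
  -- for link in links: … for page_type, patterns in IMPORTANT_PAGE_PATTERNS.items(): …
  let grouped := links.foldl (fun g link =>
    let lowered := PySem.Str.lower link
    pvPatterns.foldl (fun g kv =>
      if kv.2.any (fun pattern => PySem.Str.isIn pattern lowered) then
        pvAppendAt g kv.1 link
      else g) g) grouped
  -- {key: value[:5] for key, value in grouped.items() if value}
  (grouped.filter (fun kv => !kv.2.isEmpty)).map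
    (fun kv => (kv.1, PySem.List.slice kv.2 none (some 5)))

def important_page_candidates (links : List String) : List (List (String × String)) :=
  let grouped := important_page_links links
  let candidates := grouped.foldl (fun acc kv =>
    kv.2.foldl (fun acc link => acc ++ [[("url", link), ("page_type", kv.1)]]) acc) []
  let sortedC := PySem.List.sorted candidates
    (fun item => pvGetD pvPriority (pvItemGet item "page_type") 0) true
  PySem.List.slice sortedC none (some 10)

-- ===== PORT B =====
-- PRIORITY_ORDER (B's module constant): page types in descending priority
def pvOrder : List (String × List String) :=
  [("contact", ["/contact", "/contact-us", "/reach-us", "/locations"]),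
   ("about", ["/about", "/about-us", "/company", "/who-we-are", "/overview"]),
   ("leadership", ["/leadership", "/management", "/team", "/board"]),
   ("careers", ["/careers", "/jobs", "/join-us"])]

def important_page_candidates_alt (links : List String) : List (List (String × String)) :=
  let candidates := pvOrder.foldl (fun acc kv =>
    let matched := links.filter
      (fun link => kv.2.any (fun p => PySem.Str.isIn p (PySem.Str.lower link)))
    (PySem.List.slice matched none (some 5)).foldl
      (fun acc link => acc ++ [[("url", link), ("page_type", kv.1)]]) acc) []
  PySem.List.slice candidates none (some 10)

-- ===== PRECONDITION & SPEC =====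
def Spec_important_page_candidates (links : List String) (out : List (List (String × String))) : Prop := out = important_page_candidates_alt links
instance (links : List String) (out : List (List (String × String))) : Decidable (Spec_important_page_candidates links out) := by unfold Spec_important_page_candidates; infer_instance

-- ===== CLAIM (what is proved, stated in full; the proofs are below) =====
def Claim_equal_important_page_candidates : Prop := ∀ (links : List String), Dom_important_page_candidates links → Spec_important_page_candidates links (important_page_candidates links)

-- ===== LEMMAS AND PROOFS =====

-- proof-side abbreviations
def pvM (pats : List String) (link : String) : Bool :=
  pats.any (fun p => PySem.Str.isIn p (PySem.Str.lower link))
def pAb : List String := ["/about", "/about-us", "/company", "/who-we-are", "/overview"]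
def pCo : List String := ["/contact", "/contact-us", "/reach-us", "/locations"]
def pLe : List String := ["/leadership", "/management", "/team", "/board"]
def pCa : List String := ["/careers", "/jobs", "/join-us"]
def tagItem (pt link : String) : List (String × String) := [("url", link), ("page_type", pt)]

lemma slice5 {a : Type} (xs : List a) : PySem.List.slice xs none (some 5) = xs.take 5 := by
  simpa using PySem.List.slice_to xs (b := 5) (by norm_num)

lemma slice10 {a : Type} (xs : List a) : PySem.List.slice xs none (some 10) = xs.take 10 := by
  simpa using PySem.List.slice_to xs (b := 10) (by norm_num)

lemma stepLem (link : String) (a c l r : List String) :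
    List.foldl (fun g kv =>
        if kv.2.any (fun pattern => PySem.Str.isIn pattern (PySem.Str.lower link)) then
          pvAppendAt g kv.1 link
        else g)
      [("about", a), ("contact", c), ("leadership", l), ("careers", r)]
      [("about", pAb), ("contact", pCo), ("leadership", pLe), ("careers", pCa)]
    = [("about", a ++ (if pvM pAb link then [link] else [])),
       ("contact", c ++ (if pvM pCo link then [link] else [])),
       ("leadership", l ++ (if pvM pLe link then [link] else [])),
       ("careers", r ++ (if pvM pCa link then [link] else []))] := by
  simp only [List.foldl, pvM, pAb, pCo, pLe, pCa]
  split_ifs <;> simp [pvAppendAt]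

lemma groupFold (links : List String) : ∀ (a c l r : List String),
    List.foldl (fun g link =>
        List.foldl (fun g kv =>
            if kv.2.any (fun pattern => PySem.Str.isIn pattern (PySem.Str.lower link)) then
              pvAppendAt g kv.1 link
            else g) g
          [("about", pAb), ("contact", pCo), ("leadership", pLe), ("careers", pCa)])
      [("about", a), ("contact", c), ("leadership", l), ("careers", r)] links
    = [("about", a ++ links.filter (pvM pAb)), ("contact", c ++ links.filter (pvM pCo)),
       ("leadership", l ++ links.filter (pvM pLe)), ("careers", r ++ links.filter (pvM pCa))] := by
  induction links with
  | nil => intro a c l r; simp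
  | cons x xs ih =>
      intro a c l r
      rw [List.foldl_cons, stepLem, ih]
      simp only [List.filter_cons]
      by_cases h1 : pvM pAb x <;> by_cases h2 : pvM pCo x <;>
        by_cases h3 : pvM pLe x <;> by_cases h4 : pvM pCa x <;>
        simp [h1, h2, h3, h4]

lemma links_eq (links : List String) :
    important_page_links links =
      ([("about", links.filter (pvM pAb)), ("contact", links.filter (pvM pCo)),
        ("leadership", links.filter (pvM pLe)), ("careers", links.filter (pvM pCa))].filter
          (fun kv => !kv.2.isEmpty)).map (fun kv => (kv.1, kv.2.take 5)) := by
  have hpats : pvPatterns = [("about", pAb), ("contact", pCo), ("leadership", pLe), ("careers", pCa)] := by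
    simp [pvPatterns, pAb, pCo, pLe, pCa]
  simp only [important_page_links, hpats, List.map]
  rw [groupFold]
  simp [slice5]

lemma innerFold (pt : String) (ls : List String) : ∀ (acc : List (List (String × String))),
    List.foldl (fun acc link => acc ++ [[("url", link), ("page_type", pt)]]) acc ls
    = acc ++ ls.map (tagItem pt) := by
  induction ls with
  | nil => intro acc; simp
  | cons x xs ih => intro acc; rw [List.foldl_cons, ih]; simp [tagItem]

lemma candFold (xs : List (String × List String)) : ∀ (acc : List (List (String × String))),
    List.foldl (fun acc kv =>
        List.foldl (fun acc link => acc ++ [[("url", link), ("page_type", kv.1)]]) acc kv.2) acc xs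
    = acc ++ xs.flatMap (fun kv => kv.2.map (tagItem kv.1)) := by
  induction xs with
  | nil => intro acc; simp
  | cons kv t ih =>
      intro acc
      rw [List.foldl_cons, innerFold kv.1 kv.2, ih]
      simp

lemma flatMap_filter_nonempty (xs : List (String × List String)) :
    ((xs.filter (fun kv => !kv.2.isEmpty)).map (fun kv => (kv.1, kv.2.take 5))).flatMap
        (fun kv => kv.2.map (tagItem kv.1))
    = xs.flatMap (fun kv => (kv.2.take 5).map (tagItem kv.1)) := by
  induction xs with
  | nil => simp
  | cons kv t ih =>
      by_cases h : kv.2.isEmpty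
      · have h2 : kv.2 = [] := List.isEmpty_iff.mp h
        simp [h2, ih]
      · simp [h, ih]

-- insertion-sort lemmas (generic)
lemma insertBy_append_left {a : Type} (before : a → a → Bool) (x : a) (c0 ys : List a)
    (h : ∀ y ∈ c0, before x y = false) :
    PySem.List.insertBy before x (c0 ++ ys) = c0 ++ PySem.List.insertBy before x ys := by
  induction c0 with
  | nil => simp
  | cons k t ih =>
      have hk := h k (by simp)
      simp [PySem.List.insertBy, hk, ih (fun y hy => h y (by simp [hy]))]

lemma insertBy_front {a : Type} (before : a → a → Bool) (x : a) (ys : List a)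
    (h : ∀ y ∈ ys, before x y = true) :
    PySem.List.insertBy before x ys = x :: ys := by
  cases ys with
  | nil => rfl
  | cons y t => simp [PySem.List.insertBy, h y (by simp)]

lemma foldl_insertBy_append {a : Type} (before : a → a → Bool) (xs : List a) :
    ∀ (acc : List a), (∀ x ∈ xs, ∀ y ∈ acc, before x y = false) →
    (∀ x ∈ xs, ∀ y ∈ xs, before x y = false) →
    List.foldl (fun acc x => PySem.List.insertBy before x acc) acc xs = acc ++ xs := by
  induction xs with
  | nil => intro acc _ _; simp
  | cons x t ih =>
      intro acc h1 h2
      have hx1 : ∀ z ∈ t, ∀ y ∈ acc ++ [x], before z y = false := by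
        intro z hz y hy
        rcases List.mem_append.mp hy with hy | hy
        · exact h1 z (List.mem_cons_of_mem _ hz) y hy
        · rw [List.mem_singleton] at hy
          rw [hy]
          exact h2 z (List.mem_cons_of_mem _ hz) x List.mem_cons_self
      have hx2 : ∀ z ∈ t, ∀ y ∈ t, before z y = false := fun z hz y hy =>
        h2 z (List.mem_cons_of_mem _ hz) y (List.mem_cons_of_mem _ hy)
      rw [List.foldl_cons,
        PySem.List.insertBy_of_forall_not_before before x acc (h1 x List.mem_cons_self),
        ih (acc ++ [x]) hx1 hx2]
      simp

lemma foldl_insertBy_mid {a : Type} (before : a → a → Bool) (xs : List a) :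
    ∀ (c0 ys : List a), (∀ x ∈ xs, ∀ y ∈ c0, before x y = false) →
    (∀ x ∈ xs, ∀ y ∈ xs, before x y = false) →
    (∀ x ∈ xs, ∀ y ∈ ys, before x y = true) →
    List.foldl (fun acc x => PySem.List.insertBy before x acc) (c0 ++ ys) xs = (c0 ++ xs) ++ ys := by
  induction xs with
  | nil => intro c0 ys _ _ _; simp
  | cons x t ih =>
      intro c0 ys h1 h2 h3
      have hx1 : ∀ z ∈ t, ∀ y ∈ c0 ++ [x], before z y = false := by
        intro z hz y hy
        rcases List.mem_append.mp hy with hy | hy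
        · exact h1 z (List.mem_cons_of_mem _ hz) y hy
        · rw [List.mem_singleton] at hy
          rw [hy]
          exact h2 z (List.mem_cons_of_mem _ hz) x List.mem_cons_self
      have hx2 : ∀ z ∈ t, ∀ y ∈ t, before z y = false := fun z hz y hy =>
        h2 z (List.mem_cons_of_mem _ hz) y (List.mem_cons_of_mem _ hy)
      have hx3 : ∀ z ∈ t, ∀ y ∈ ys, before z y = true := fun z hz y hy =>
        h3 z (List.mem_cons_of_mem _ hz) y hy
      rw [List.foldl_cons, insertBy_append_left before x c0 ys (h1 x List.mem_cons_self),
        insertBy_front before x ys (h3 x List.mem_cons_self),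
        show c0 ++ x :: ys = (c0 ++ [x]) ++ ys by simp,
        ih (c0 ++ [x]) ys hx1 hx2 hx3]
      simp

lemma sortBlocks {a : Type} (key : a → Int) (A C L R : List a)
    (hA : ∀ x ∈ A, key x = 3) (hC : ∀ x ∈ C, key x = 4)
    (hL : ∀ x ∈ L, key x = 2) (hR : ∀ x ∈ R, key x = 1) :
    PySem.List.sorted (A ++ (C ++ (L ++ R))) key true = ((C ++ A) ++ L) ++ R := by
  rw [PySem.List.sorted_rev_eq_foldl_insertBy]
  simp only [List.foldl_append]
  have e1 : List.foldl (fun acc x => PySem.List.insertBy (fun p q => decide (key q < key p)) x acc)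
      [] A = A := by
    rw [foldl_insertBy_append _ A []
      (by intro x _ y hy; simp at hy)
      (by intro x hx y hy
          show decide (key y < key x) = false
          rw [hA x hx, hA y hy]; simp)]
    simp
  have e2 : List.foldl (fun acc x => PySem.List.insertBy (fun p q => decide (key q < key p)) x acc)
      A C = C ++ A := by
    have h := foldl_insertBy_mid (fun p q => decide (key q < key p)) C [] A
      (by intro x _ y hy; simp at hy)
      (by intro x hx y hy
          show decide (key y < key x) = false
          rw [hC x hx, hC y hy]; simp)
      (by intro x hx y hy
          show decide (key y < key x) = true
          rw [hC x hx, hA y hy]; simp)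
    simpa using h
  have e3 : List.foldl (fun acc x => PySem.List.insertBy (fun p q => decide (key q < key p)) x acc)
      (C ++ A) L = (C ++ A) ++ L := by
    rw [foldl_insertBy_append _ L (C ++ A)
      (by intro x hx y hy
          show decide (key y < key x) = false
          rcases List.mem_append.mp hy with hy | hy
          · rw [hL x hx, hC y hy]; simp
          · rw [hL x hx, hA y hy]; simp)
      (by intro x hx y hy
          show decide (key y < key x) = false
          rw [hL x hx, hL y hy]; simp)]
  have e4 : List.foldl (fun acc x => PySem.List.insertBy (fun p q => decide (key q < key p)) x acc)
      ((C ++ A) ++ L) R = ((C ++ A) ++ L) ++ R := by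
    rw [foldl_insertBy_append _ R ((C ++ A) ++ L)
      (by intro x hx y hy
          show decide (key y < key x) = false
          rcases List.mem_append.mp hy with hy | hy
          · rcases List.mem_append.mp hy with hy | hy
            · rw [hR x hx, hC y hy]; simp
            · rw [hR x hx, hA y hy]; simp
          · rw [hR x hx, hL y hy]; simp)
      (by intro x hx y hy
          show decide (key y < key x) = false
          rw [hR x hx, hR y hy]; simp)]
  rw [e1, e2, e3, e4]

lemma A_eq (links : List String) :
    important_page_candidates links =
      (((((links.filter (pvM pCo)).take 5).map (tagItem "contact") ++
          ((links.filter (pvM pAb)).take 5).map (tagItem "about")) ++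
         ((links.filter (pvM pLe)).take 5).map (tagItem "leadership")) ++
        ((links.filter (pvM pCa)).take 5).map (tagItem "careers")).take 10 := by
  simp only [important_page_candidates]
  rw [links_eq, candFold, flatMap_filter_nonempty]
  simp only [List.nil_append, List.flatMap_cons, List.flatMap_nil, List.append_nil]
  rw [sortBlocks (fun item => pvGetD pvPriority (pvItemGet item "page_type") 0)
        (((links.filter (pvM pAb)).take 5).map (tagItem "about"))
        (((links.filter (pvM pCo)).take 5).map (tagItem "contact"))
        (((links.filter (pvM pLe)).take 5).map (tagItem "leadership"))
        (((links.filter (pvM pCa)).take 5).map (tagItem "careers"))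
        ?_ ?_ ?_ ?_]
  · rw [slice10]
  all_goals
    intro x hx
    obtain ⟨l, _, rfl⟩ := List.mem_map.mp hx
    simp [tagItem, pvItemGet, pvGetD, pvPriority]

lemma B_eq (links : List String) :
    important_page_candidates_alt links =
      (((((links.filter (pvM pCo)).take 5).map (tagItem "contact") ++
          ((links.filter (pvM pAb)).take 5).map (tagItem "about")) ++
         ((links.filter (pvM pLe)).take 5).map (tagItem "leadership")) ++
        ((links.filter (pvM pCa)).take 5).map (tagItem "careers")).take 10 := by
  simp only [important_page_candidates_alt, pvOrder, List.foldl]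
  rw [show (fun link => (["/contact", "/contact-us", "/reach-us", "/locations"] : List String).any
        (fun p => PySem.Str.isIn p (PySem.Str.lower link))) = pvM pCo from rfl,
      show (fun link => (["/about", "/about-us", "/company", "/who-we-are", "/overview"] : List String).any
        (fun p => PySem.Str.isIn p (PySem.Str.lower link))) = pvM pAb from rfl,
      show (fun link => (["/leadership", "/management", "/team", "/board"] : List String).any
        (fun p => PySem.Str.isIn p (PySem.Str.lower link))) = pvM pLe from rfl,
      show (fun link => (["/careers", "/jobs", "/join-us"] : List String).any
        (fun p => PySem.Str.isIn p (PySem.Str.lower link))) = pvM pCa from rfl]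
  simp only [slice5, innerFold, List.nil_append]
  rw [slice10]

-- ===== VERDICT (by name: the statement is the Claim_ definition above) =====
theorem important_page_candidates_spec : Claim_equal_important_page_candidates := by
  intro links _
  unfold Spec_important_page_candidates
  rw [A_eq, B_eq]
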